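-- pv_equiv track=rewrite | github.com/PrinceSinghhub/GFG-Questions | Minimum times A has to be repeated such that B is a substring of it.py | minRepeats
-- ===== SOURCE A (Python) =====
-- def minRepeats(A, B):
--
--     a = len(A)
--     b = len(B)
--     h = a
--     s = ""
--     c = 0
--     while a <= b:
--         s = s + A
--         a = a + h
--         c = c + 1
--     if B in s:
--         return c
--     elif B in s + A:
--         return c + 1
--     else:
--         return -1
-- ===== SOURCE B (Python) =====
-- def minRepeats(A, B):
--     c = len(B) // len(A)
--     if B in A * c:
--         return c
--     if B in A * (c + 1):
--         return c + 1
--     return -1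
-- ===== Notes on version B (the rewrite author's own statement) =====
-- stated objective: simpler
-- what changed: Replaces the accumulation while-loop with the closed-form repeat count c = len(B)//len(A) and materialises A*c / A*(c+1) directly for the two membership tests.
import Mathlib
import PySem

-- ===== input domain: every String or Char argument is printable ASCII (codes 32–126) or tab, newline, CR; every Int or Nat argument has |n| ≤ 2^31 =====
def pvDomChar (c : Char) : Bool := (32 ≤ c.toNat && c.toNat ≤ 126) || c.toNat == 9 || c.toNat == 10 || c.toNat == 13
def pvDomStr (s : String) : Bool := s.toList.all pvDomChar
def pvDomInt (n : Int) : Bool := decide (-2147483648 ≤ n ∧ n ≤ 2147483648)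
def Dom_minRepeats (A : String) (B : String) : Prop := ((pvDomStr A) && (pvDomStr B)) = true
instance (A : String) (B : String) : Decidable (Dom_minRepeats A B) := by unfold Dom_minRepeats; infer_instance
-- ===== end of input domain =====

-- B replaces A's accumulation while-loop by the closed-form repeat count len(B)//len(A)
-- and materialises the repeated string directly (objective: simpler).

-- ===== PORT A =====
-- the while loop of A over the state (a, s, c); fuel only makes it total:
-- b.toNat + 1 iterations always suffice when h = len(A) > 0 (the Pre_ domain)
def pvLoopA (AL : List Char) (h b : Int) : Nat → Int → List Char → Int → (List Char × Int)
  | 0, _, s, c => (s, c)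
  | fuel + 1, a, s, c =>
      if a ≤ b then pvLoopA AL h b fuel (a + h) (s ++ AL) (c + 1) else (s, c)

def minRepeats (A : String) (B : String) : Int :=
  let a : Int := PySem.Str.len A
  let b : Int := PySem.Str.len B
  let h : Int := a
  let r := pvLoopA A.toList h b (b.toNat + 1) a [] 0
  if PySem.Chars.isIn B.toList r.1 then r.2
  else if PySem.Chars.isIn B.toList (r.1 ++ A.toList) then r.2 + 1
  else -1

-- ===== PORT B =====
def minRepeats_alt (A : String) (B : String) : Int :=
  let c : Int := PySem.Int.floordiv (PySem.Str.len B) (PySem.Str.len A)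
  if PySem.Chars.isIn B.toList (PySem.List.pyRepeat A.toList c) then c
  else if PySem.Chars.isIn B.toList (PySem.List.pyRepeat A.toList (c + 1)) then c + 1
  else -1

-- ===== PRECONDITION & SPEC =====
-- Pre_ excludes only A = "", where the Python A loops forever (while 0 <= len(B) never
-- exits) and the Python B raises ZeroDivisionError.
def Pre_minRepeats (A : String) (B : String) : Prop := A ≠ ""
instance (A : String) (B : String) : Decidable (Pre_minRepeats A B) := by unfold Pre_minRepeats; infer_instance
def pvWitness_minRepeats : String × String := ("ab", "ababab")

def Spec_minRepeats (A : String) (B : String) (out : Int) : Prop := out = minRepeats_alt A B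
instance (A : String) (B : String) (out : Int) : Decidable (Spec_minRepeats A B out) := by unfold Spec_minRepeats; infer_instance

-- ===== CLAIM (what is proved, stated in full; the proofs are below) =====
def Claim_equal_minRepeats : Prop := ∀ (A : String) (B : String), Dom_minRepeats A B → Pre_minRepeats A B → Spec_minRepeats A B (minRepeats A B)

-- ===== LEMMAS AND PROOFS =====

-- number of iterations the while loop performs when entered with counter value a
def pvIter (h b a : Int) : Int := if a ≤ b then (b - a) / h + 1 else 0

lemma pvIter_nonneg {h b a : Int} (hh : 0 < h) : 0 ≤ pvIter h b a := by
  unfold pvIter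
  split_ifs with hab
  · have : 0 ≤ (b - a) / h := Int.ediv_nonneg (by omega) (by omega)
    omega
  · omega

lemma pvIter_step {h b a : Int} (hh : 0 < h) (hab : a ≤ b) :
    pvIter h b a = pvIter h b (a + h) + 1 := by
  unfold pvIter
  by_cases h2 : a + h ≤ b
  · simp only [hab, h2, if_pos]
    have : (b - (a + h)) = (b - a) + (-1) * h := by ring
    rw [this, Int.add_mul_ediv_right _ _ (by omega : h ≠ 0)]
    ring
  · simp only [hab, h2, if_pos, if_neg, not_false_iff]
    have : (b - a) / h = 0 := Int.ediv_eq_zero_of_lt (by omega) (by omega)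
    omega

lemma pyRepeat_succ (AL : List Char) (n : Int) (hn : 0 ≤ n) :
    PySem.List.pyRepeat AL (n + 1) = AL ++ PySem.List.pyRepeat AL n := by
  unfold PySem.List.pyRepeat
  have : (n + 1).toNat = n.toNat + 1 := by omega
  rw [this, List.replicate_succ, List.flatten_cons]

lemma pyRepeat_snoc (AL : List Char) (n : Int) (hn : 0 ≤ n) :
    PySem.List.pyRepeat AL n ++ AL = PySem.List.pyRepeat AL (n + 1) := by
  unfold PySem.List.pyRepeat
  have h1 : (n + 1).toNat = n.toNat + 1 := by omega
  rw [h1]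
  induction n.toNat with
  | zero => simp
  | succ k ih =>
      rw [List.replicate_succ, List.flatten_cons, List.append_assoc, ih]
      conv_rhs => rw [List.replicate_succ, List.flatten_cons]

lemma pvLoopA_eq (AL : List Char) (h b : Int) (hh : 0 < h) :
    ∀ (fuel : Nat) (a : Int) (s : List Char) (c : Int),
      b < a + fuel * h →
      pvLoopA AL h b fuel a s c =
        (s ++ PySem.List.pyRepeat AL (pvIter h b a), c + pvIter h b a) := by
  intro fuel
  induction fuel with
  | zero =>
      intro a s c hf
      simp only [Nat.cast_zero, zero_mul, add_zero] at hf
      unfold pvLoopA pvIter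
      rw [if_neg (by omega)]
      simp [PySem.List.pyRepeat]
  | succ n ih =>
      intro a s c hf
      unfold pvLoopA
      by_cases hab : a ≤ b
      · rw [if_pos hab, ih (a + h) (s ++ AL) (c + 1) (by push_cast at hf ⊢; nlinarith)]
        rw [pvIter_step hh hab,
          pyRepeat_succ AL _ (pvIter_nonneg (a := a + h) hh)]
        simp only [Prod.mk.injEq, List.append_assoc, true_and]
        ring
      · rw [if_neg hab]
        unfold pvIter
        rw [if_neg hab]
        simp [PySem.List.pyRepeat]

lemma pvIter_start {h b : Int} (hh : 0 < h) (hb : 0 ≤ b) :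
    pvIter h b h = b / h := by
  unfold pvIter
  by_cases h2 : h ≤ b
  · rw [if_pos h2]
    have : b - h = b + (-1) * h := by ring
    rw [this, Int.add_mul_ediv_right _ _ (by omega : h ≠ 0)]
    ring
  · rw [if_neg h2]
    exact (Int.ediv_eq_zero_of_lt hb (by omega)).symm

-- ===== VERDICT (by name: the statement is the Claim_ definition above) =====
theorem minRepeats_spec : Claim_equal_minRepeats := by
  intro A B _ hpre
  unfold Spec_minRepeats minRepeats minRepeats_alt
  dsimp only
  have hAL : A.toList ≠ [] := by
    intro hnil
    apply hpre
    have h1 := congrArg String.ofList hnil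
    rwa [String.ofList_toList] at h1
  have hh : (0 : Int) < PySem.Str.len A := by
    have := List.length_pos_iff.mpr hAL
    simp only [PySem.Str.len]; exact_mod_cast this
  have hb : (0 : Int) ≤ PySem.Str.len B := by
    simp only [PySem.Str.len]; positivity
  have hfuel : PySem.Str.len B <
      PySem.Str.len A + ((PySem.Str.len B).toNat + 1 : Nat) * PySem.Str.len A := by
    push_cast
    have ht : ((PySem.Str.len B).toNat : Int) = PySem.Str.len B := Int.toNat_of_nonneg hb
    nlinarith
  rw [pvLoopA_eq A.toList (PySem.Str.len A) (PySem.Str.len B) hh _ _ _ _ hfuel]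
  rw [pvIter_start hh hb,
    PySem.Int.floordiv_eq_ediv_of_pos hh]
  have hq : (0 : Int) ≤ PySem.Str.len B / PySem.Str.len A := Int.ediv_nonneg hb (by omega)
  simp only [List.nil_append, zero_add, pyRepeat_snoc A.toList _ hq]
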